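-- pv_equiv track=rewrite | github.com/yooseop18/SW_Python | 알고리즘 공부/31. 상위 K빈도 요소(zip).py | top_freq1
-- ===== SOURCE A (Python) =====
-- import collections
--
-- def top_freq1(input_: list[int], k: int) -> list:
--     dict_ = collections.defaultdict(int)
--     arr: list[int] = []
--
--     for num in input_:
--         dict_[num] += 1
--         if dict_[num] >= k and num not in arr:
--             arr.append(num)
--
--     return arr
-- ===== SOURCE B (Python) =====
-- def top_freq1(input_: list[int], k: int) -> list:
--     # Index every value's occurrence positions once, then keep values with
--     # count >= k and sort them by the index where they reached the threshold.
--     occ = {}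
--     for i, num in enumerate(input_):
--         occ.setdefault(num, []).append(i)
--     t = max(k, 1) - 1
--     kept = [(pos[t], v) for v, pos in occ.items() if len(pos) >= k]
--     kept.sort(key=lambda p: p[0])
--     return [v for _, v in kept]
-- ===== Notes on version B (the rewrite author's own statement) =====
-- stated objective: alternative
-- what changed: A streams through the list keeping a running counter and appending on threshold crossing (with a linear 'num not in arr' re-scan per element); B builds an occurrence-position index in one pass, keeps values with count >= k, and sorts them by their threshold-crossing position occ[v][max(k,1)-1].
import Mathlib
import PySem

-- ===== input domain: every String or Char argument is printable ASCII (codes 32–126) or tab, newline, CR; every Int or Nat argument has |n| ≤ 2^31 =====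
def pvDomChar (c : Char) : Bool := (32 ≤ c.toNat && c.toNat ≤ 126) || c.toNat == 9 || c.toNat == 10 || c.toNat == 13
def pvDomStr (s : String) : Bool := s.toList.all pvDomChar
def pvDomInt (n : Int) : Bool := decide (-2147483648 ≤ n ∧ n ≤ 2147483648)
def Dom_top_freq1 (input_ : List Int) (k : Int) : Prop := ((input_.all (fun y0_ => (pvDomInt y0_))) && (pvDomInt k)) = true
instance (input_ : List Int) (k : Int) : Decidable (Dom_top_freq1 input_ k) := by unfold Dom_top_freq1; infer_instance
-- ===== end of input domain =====

-- B replaces A's streaming scan (with its linear `num not in arr` re-scan) by an occurrence-index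
-- table plus a sort by threshold-crossing position; return values are proved identical.

-- ===== PORT A =====
def top_freq1 (input_ : List Int) (k : Int) : List Int :=
  (input_.foldl
    (fun (st : PySem.Dict Int Int × List Int) num =>
      let d := st.1.insert num (st.1.getD num 0 + 1)
      if k ≤ d.getD num 0 ∧ ¬ num ∈ st.2 then (d, st.2 ++ [num]) else (d, st.2))
    (PySem.Dict.empty, [])).2

-- ===== PORT B =====
def top_freq1_alt (input_ : List Int) (k : Int) : List Int :=
  let occ := (PySem.List.enumerate input_).foldl
      (fun (d : PySem.Dict Int (List Int)) p => d.modify p.2 [] (· ++ [p.1]))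
      PySem.Dict.empty
  let t : Int := max k 1 - 1
  let kept := (occ.items.filter (fun p => decide (k ≤ (p.2.length : Int)))).map
      (fun p => (PySem.List.pyGetD p.2 t 0, p.1))
  (PySem.List.sorted kept (fun q => q.1) false).map (fun q => q.2)

-- ===== PRECONDITION & SPEC =====
def Spec_top_freq1 (input_ : List Int) (k : Int) (out : List Int) : Prop := out = top_freq1_alt input_ k
instance (input_ : List Int) (k : Int) (out : List Int) : Decidable (Spec_top_freq1 input_ k out) := by unfold Spec_top_freq1; infer_instance

-- ===== CLAIM (what is proved, stated in full; the proofs are below) =====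
def Claim_equal_top_freq1 : Prop := ∀ (input_ : List Int) (k : Int), Dom_top_freq1 input_ k → Spec_top_freq1 input_ k (top_freq1 input_ k)

-- ===== LEMMAS AND PROOFS =====

-- A's loop body, named for the proofs
def stepA (k : Int) (st : PySem.Dict Int Int × List Int) (num : Int) :
    PySem.Dict Int Int × List Int :=
  let d := st.1.insert num (st.1.getD num 0 + 1)
  if k ≤ d.getD num 0 ∧ ¬ num ∈ st.2 then (d, st.2 ++ [num]) else (d, st.2)

def arrA (k : Int) (l : List Int) : List Int :=
  (l.foldl (stepA k) (PySem.Dict.empty, [])).2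

lemma top_freq1_eq_arrA (input_ : List Int) (k : Int) :
    top_freq1 input_ k = arrA k input_ := rfl

-- occurrence-index list of v in l, enumeration starting at s
def occS (l : List Int) (s v : Int) : List Int :=
  ((PySem.List.enumerate l s).filter (fun p => p.2 == v)).map (·.1)

def cross (input_ : List Int) (k v : Int) : Int :=
  PySem.List.pyGetD (occS input_ 0 v) (max k 1 - 1) 0

lemma occS_cons (x : Int) (l : List Int) (s v : Int) :
    occS (x :: l) s v = (if x == v then [s] else []) ++ occS l (s + 1) v := by
  simp [occS, PySem.List.enumerate_cons, List.filter_cons]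
  split <;> simp_all

lemma occS_append (l1 l2 : List Int) (s v : Int) :
    occS (l1 ++ l2) s v = occS l1 s v ++ occS l2 (s + l1.length) v := by
  simp [occS, PySem.List.enumerate_append, List.filter_append]

lemma length_occS (l : List Int) (s v : Int) : (occS l s v).length = l.count v := by
  induction l generalizing s with
  | nil => rfl
  | cons x l ih =>
    rw [occS_cons, List.length_append, ih]
    by_cases h : x = v
    · simp [h]
      omega
    · simp [h]

lemma stepA_fst (k : Int) (st : PySem.Dict Int Int × List Int) (num : Int) :
    (stepA k st num).1 = st.1.insert num (st.1.getD num 0 + 1) := by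
  unfold stepA
  dsimp only
  split <;> rfl

lemma stepA_snd (k : Int) (st : PySem.Dict Int Int × List Int) (num : Int) :
    (stepA k st num).2
      = if k ≤ st.1.getD num 0 + 1 ∧ ¬ num ∈ st.2 then st.2 ++ [num] else st.2 := by
  unfold stepA
  dsimp only
  rw [PySem.Dict.getD_insert_self]
  split <;> rfl

-- the dict component of A's fold is the plain counter fold
lemma fst_fold (k : Int) (l : List Int) (d : PySem.Dict Int Int) (arr : List Int) :
    (l.foldl (stepA k) (d, arr)).1
      = l.foldl (fun d x => d.insert x (d.getD x 0 + 1)) d := by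
  induction l generalizing d arr with
  | nil => rfl
  | cons x l ih =>
    simp only [List.foldl_cons]
    rw [show stepA k (d, arr) x
          = ((stepA k (d, arr) x).1, (stepA k (d, arr) x).2) from rfl,
        stepA_fst, ih]

lemma getD_fst_fold (k : Int) (l : List Int) (v : Int) :
    (l.foldl (stepA k) (PySem.Dict.empty, [])).1.getD v 0 = (l.count v : Int) := by
  rw [fst_fold, PySem.Dict.getD_foldl_insert_add_one, PySem.Dict.getD_empty]
  omega

lemma arrA_snoc (k : Int) (l : List Int) (x : Int) :
    arrA k (l ++ [x])
      = if k ≤ (l.count x : Int) + 1 ∧ ¬ x ∈ arrA k l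
        then arrA k l ++ [x] else arrA k l := by
  unfold arrA
  rw [List.foldl_append, List.foldl_cons, List.foldl_nil, stepA_snd, getD_fst_fold]

lemma mem_arrA (k : Int) (l : List Int) (v : Int) :
    v ∈ arrA k l ↔ (max k 1 : Int) ≤ (l.count v : Int) := by
  induction l using List.reverseRecOn with
  | nil => simp [arrA]
  | append_singleton l x ih =>
    rw [arrA_snoc]
    by_cases hv : v = x
    · subst hv
      have hc : (l ++ [v]).count v = l.count v + 1 := by simp
      rw [hc]
      push_cast
      by_cases h : k ≤ (l.count v : Int) + 1 ∧ ¬ v ∈ arrA k l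
      · rw [if_pos h]
        simp only [List.mem_append, List.mem_singleton]
        constructor
        · intro _
          have : (0:Int) ≤ (l.count v : Int) := by positivity
          omega
        · intro _
          simp
      · rw [if_neg h, ih]
        rcases not_and_or.mp h with h | h
        · constructor <;> intro <;> omega
        · rw [not_not, ih] at h
          constructor <;> intro <;> omega
    · have h0 : List.count v [x] = 0 := List.count_eq_zero.mpr (by simp [hv])
      have hc : (l ++ [x]).count v = l.count v := by
        rw [List.count_append, h0]
        omega
      rw [hc]
      by_cases h : k ≤ (l.count x : Int) + 1 ∧ ¬ x ∈ arrA k l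
      · rw [if_pos h]
        simp [hv, ih]
      · rw [if_neg h]
        exact ih

lemma nodup_arrA (k : Int) (l : List Int) : (arrA k l).Nodup := by
  induction l using List.reverseRecOn with
  | nil => simp [arrA]
  | append_singleton l x ih =>
    rw [arrA_snoc]
    by_cases h : k ≤ (l.count x : Int) + 1 ∧ ¬ x ∈ arrA k l
    · rw [if_pos h]
      simp only [List.nodup_append, List.nodup_singleton, true_and]
      refine ⟨ih, ?_⟩
      intro a ha b hb
      rw [List.mem_singleton] at hb
      subst hb
      exact fun e => h.2 (e ▸ ha)
    · rw [if_neg h]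
      exact ih

-- the element appended at position pre.length crosses exactly there
lemma cross_at_append (k : Int) (pre rest : List Int) (x : Int)
    (hc : (pre.count x : Int) = max k 1 - 1) :
    cross (pre ++ x :: rest) k x = (pre.length : Int) := by
  unfold cross
  rw [occS_append, occS_cons]
  simp only [BEq.rfl, if_true]
  have hidx : (max k 1 - 1) = ((max k 1 - 1).toNat : Int) := by omega
  have hlen : (occS pre 0 x).length = (max k 1 - 1).toNat := by
    rw [length_occS]; omega
  rw [hidx, PySem.List.pyGetD_natCast, ← hlen,
      List.getD_append_right _ _ _ _ (le_refl _)]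
  simp

-- main invariant on A's list: crossing indices strictly increase and stay below the prefix length
lemma arrA_inv (k : Int) (pre : List Int) : ∀ rest : List Int,
    ((arrA k pre).map (fun v => cross (pre ++ rest) k v)).Pairwise (· < ·)
    ∧ ∀ v ∈ arrA k pre, cross (pre ++ rest) k v < (pre.length : Int) := by
  induction pre using List.reverseRecOn with
  | nil => intro rest; simp [arrA]
  | append_singleton l x ih =>
    intro rest
    have ihr := ih (x :: rest)
    have hassoc : l ++ [x] ++ rest = l ++ x :: rest := by simp
    rw [arrA_snoc, hassoc]
    by_cases h : k ≤ (l.count x : Int) + 1 ∧ ¬ x ∈ arrA k l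
    · rw [if_pos h]
      rcases h with ⟨h1, h2⟩
      rw [mem_arrA] at h2
      have h0 : (0:Int) ≤ (l.count x : Int) := by positivity
      have hcx : (l.count x : Int) = max k 1 - 1 := by omega
      have hx := cross_at_append k l rest x hcx
      constructor
      · rw [List.map_append, List.map_singleton, List.pairwise_append]
        refine ⟨ihr.1, List.pairwise_singleton _ _, ?_⟩
        intro a ha b hb
        simp only [List.mem_singleton] at hb
        subst hb
        rcases List.mem_map.1 ha with ⟨v, hv, rfl⟩
        calc cross (l ++ x :: rest) k v < (l.length : Int) := ihr.2 v hv
          _ = cross (l ++ x :: rest) k x := hx.symm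
      · intro v hv
        rcases List.mem_append.1 hv with hv | hv
        · have := ihr.2 v hv
          simp only [List.length_append, List.length_singleton]
          push_cast
          omega
        · simp only [List.mem_singleton] at hv
          subst hv
          rw [hx]
          simp only [List.length_append, List.length_singleton]
          push_cast
          omega
    · rw [if_neg h]
      refine ⟨ihr.1, ?_⟩
      intro v hv
      have := ihr.2 v hv
      simp only [List.length_append, List.length_singleton]
      push_cast
      omega

-- B reduced to a filter of the deduplicated values, tagged with their crossing index
def occD (input_ : List Int) : PySem.Dict Int (List Int) :=
  (PySem.List.enumerate input_).foldl
    (fun (d : PySem.Dict Int (List Int)) p => d.modify p.2 [] (· ++ [p.1]))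
    PySem.Dict.empty

lemma alt_unfold (input_ : List Int) (k : Int) :
    top_freq1_alt input_ k
      = (PySem.List.sorted
          (((occD input_).items.filter (fun p => decide (k ≤ (p.2.length : Int)))).map
            (fun p => (PySem.List.pyGetD p.2 (max k 1 - 1) 0, p.1)))
          (fun q => q.1) false).map (fun q => q.2) := rfl

lemma keys_occD (input_ : List Int) : (occD input_).keys = PySem.Set.ofList input_ := by
  have h := PySem.Dict.keys_foldl_modify_key (PySem.List.enumerate input_)
    (fun p => p.2) [] (fun _ p => fun x => x ++ [p.1]) PySem.Dict.empty
  rw [PySem.List.map_snd_enumerate] at h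
  exact h

lemma nodup_keys_occD (input_ : List Int) : (occD input_).keys.Nodup := by
  rw [keys_occD]
  exact PySem.Set.nodup_ofList input_

lemma getD_occD (input_ : List Int) (v : Int) :
    (occD input_).getD v [] = occS input_ 0 v := by
  have hswap : occD input_ = ((PySem.List.enumerate input_).map Prod.swap).foldl
      (fun (d : PySem.Dict Int (List Int)) p => d.modify p.1 [] fun x => x ++ [p.2])
      PySem.Dict.empty := by
    unfold occD
    rw [List.foldl_map]
    rfl
  rw [hswap, PySem.Dict.getD_foldl_modify_append, PySem.Dict.getD_empty,
      List.nil_append, List.filter_map]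
  unfold occS
  have hpred : ((fun (p : Int × Int) => p.1 == v) ∘ Prod.swap)
      = fun (p : Int × Int) => p.2 == v := rfl
  rw [hpred, List.map_map]
  rfl

lemma items_occD (input_ : List Int) :
    (occD input_).items
      = (PySem.Set.ofList input_).map (fun v => (v, occS input_ 0 v)) := by
  rw [PySem.Dict.items_eq_map_keys (occD input_) (nodup_keys_occD input_) [],
      keys_occD]
  exact List.map_congr_left (fun v _ => by rw [getD_occD input_ v])

lemma alt_eq (input_ : List Int) (k : Int) :
    top_freq1_alt input_ k
      = (PySem.List.sorted
          (((PySem.Set.ofList input_).filter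
              (fun v => decide (k ≤ (input_.count v : Int)))).map
            (fun v => (cross input_ k v, v)))
          (fun q => q.1) false).map (fun q => q.2) := by
  rw [alt_unfold, items_occD, List.filter_map, List.map_map]
  have hpred2 : ((fun (p : Int × List Int) => decide (k ≤ ((p.2.length : Int))))
        ∘ fun v => (v, occS input_ 0 v))
      = fun v => decide (k ≤ (input_.count v : Int)) := by
    funext v
    simp only [Function.comp_apply]
    rw [length_occS]
  rw [hpred2]
  rfl

theorem top_freq1_spec : Claim_equal_top_freq1 := by
  intro input_ k _
  unfold Spec_top_freq1
  rw [alt_eq, top_freq1_eq_arrA]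
  have hperm : ((arrA k input_).map (fun v => (cross input_ k v, v))).Perm
      (((PySem.Set.ofList input_).filter
          (fun v => decide (k ≤ (input_.count v : Int)))).map
        (fun v => (cross input_ k v, v))) := by
    apply List.Perm.map
    rw [List.perm_ext_iff_of_nodup (nodup_arrA k input_)
        ((PySem.Set.nodup_ofList input_).filter _)]
    intro v
    rw [mem_arrA, List.mem_filter, PySem.Set.mem_ofList]
    constructor
    · intro h
      have h1 : (1 : Int) ≤ max k 1 := le_max_right _ _
      have hpos : 0 < input_.count v := by omega
      refine ⟨List.count_pos_iff.mp hpos, ?_⟩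
      simp only [decide_eq_true_eq]
      omega
    · rintro ⟨hmem, hk⟩
      simp only [decide_eq_true_eq] at hk
      have hpos : 0 < input_.count v := List.count_pos_iff.mpr hmem
      omega
  have hpair : ((arrA k input_).map (fun v => (cross input_ k v, v))).Pairwise
      (fun a b => a.1 < b.1) := by
    have := (arrA_inv k input_ []).1
    rw [List.append_nil] at this
    rw [List.pairwise_map]
    rw [List.pairwise_map] at this
    exact this
  rw [PySem.List.sorted_eq_of_perm_of_pairwise_lt _ _ _ hperm hpair, List.map_map]
  have : ((fun (q : Int × Int) => q.2) ∘ fun v => (cross input_ k v, v)) = id := rfl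
  rw [this, List.map_id]
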